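-- pv_equiv track=rewrite | github.com/drgrigg/SE_metadata_exporter | colo_read.py | sortable_name
-- ===== SOURCE A (Python) =====
-- def sortable_name(string_value: str) -> str:
-- 	# assumes last word in string is the surname
-- 	names = string_value.split(" ")
-- 	if len(names) > 1:
-- 		accumulator = names[len(names) - 1]
-- 		accumulator += ", "
-- 		for i in range(0, len(names) - 1):
-- 			accumulator += names[i] + " "
-- 		string_value = accumulator
-- 	return string_value
-- ===== SOURCE B (Python) =====
-- def sortable_name(string_value: str) -> str:
--     # split off the final space-delimited token in one operation
--     head, sep, last = string_value.rpartition(" ")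
--     if sep:
--         return last + ", " + head + " "
--     return string_value
-- ===== Notes on version B (the rewrite author's own statement) =====
-- stated objective: simpler
-- what changed: Replaces split-into-all-tokens plus an index-arithmetic accumulator loop with a single rpartition at the last space and one concatenation.
import Mathlib
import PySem

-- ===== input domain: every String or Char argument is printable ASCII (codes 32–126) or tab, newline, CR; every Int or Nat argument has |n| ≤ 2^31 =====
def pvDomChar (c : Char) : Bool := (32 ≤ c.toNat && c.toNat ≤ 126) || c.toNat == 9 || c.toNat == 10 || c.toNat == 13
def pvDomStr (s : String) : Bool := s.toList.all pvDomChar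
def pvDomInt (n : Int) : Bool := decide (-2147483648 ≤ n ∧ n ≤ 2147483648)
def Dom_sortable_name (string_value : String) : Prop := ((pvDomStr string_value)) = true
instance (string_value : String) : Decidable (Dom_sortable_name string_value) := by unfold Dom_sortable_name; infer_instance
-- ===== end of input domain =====

-- B replaces A's split-into-all-tokens + accumulator loop by a single rpartition at the last space (simpler).


-- ===== PORT A =====
-- names = string_value.split(" "); if len > 1: acc = names[-1 by index] + ", "; loop appends names[i] + " "
def sortable_name (string_value : String) : String :=
  let names := PySem.Chars.splitOn string_value.toList [' ']
  if 1 < names.length then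
    String.ofList
      ((PySem.List.pyRange 0 ((names.length : Int) - 1) 1).foldl
        (fun a i => a ++ PySem.List.pyGetD names i [] ++ [' '])
        (PySem.List.pyGetD names ((names.length : Int) - 1) [] ++ [',', ' ']))
  else string_value

-- ===== PORT B =====
-- head, sep, last = string_value.rpartition(" ")  — ported by hand, exact: split at the LAST space
-- (reverse; take/drop up to the first space of the reverse). If sep exists: last + ", " + head + " ".
def pvNotSpace (c : Char) : Bool := c ≠ ' '

def sortable_name_alt (string_value : String) : String :=
  match string_value.toList.reverse.dropWhile pvNotSpace with
  | [] => string_value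
  | _ :: headRev =>
      String.ofList ((string_value.toList.reverse.takeWhile pvNotSpace).reverse
        ++ [',', ' '] ++ headRev.reverse ++ [' '])

-- ===== PRECONDITION & SPEC =====
def Spec_sortable_name (string_value : String) (out : String) : Prop := out = sortable_name_alt string_value
instance (string_value : String) (out : String) : Decidable (Spec_sortable_name string_value out) := by unfold Spec_sortable_name; infer_instance

-- ===== CLAIM (what is proved, stated in full; the proofs are below) =====
def Claim_equal_sortable_name : Prop := ∀ (string_value : String), Dom_sortable_name string_value → Spec_sortable_name string_value (sortable_name string_value)

-- ===== LEMMAS AND PROOFS =====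

-- простой structural single-char split (reference model of split(" "))
def pvSplit1 : List Char → List (List Char)
  | [] => [[]]
  | c :: r =>
      if c = ' ' then [] :: pvSplit1 r
      else
        match pvSplit1 r with
        | [] => [[c]]
        | p :: ps => (c :: p) :: ps

def pvMapHead (f : List Char → List Char) : List (List Char) → List (List Char)
  | [] => []
  | x :: xs => f x :: xs

theorem pvSplit1_ne_nil (l : List Char) : pvSplit1 l ≠ [] := by
  cases l with
  | nil => simp [pvSplit1]
  | cons c r =>
    simp only [pvSplit1]
    split
    · simp
    · cases h : pvSplit1 r <;> simp

theorem pvSplit1_cons_ne_space (c : Char) (r : List Char) (h : c ≠ ' ') :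
    pvSplit1 (c :: r) = pvMapHead (c :: ·) (pvSplit1 r) := by
  simp only [pvSplit1, if_neg h]
  cases hr : pvSplit1 r with
  | nil => exact absurd hr (pvSplit1_ne_nil r)
  | cons p ps => simp [pvMapHead]

theorem pvGo_eq (fuel : Nat) :
    ∀ (l cur : List Char) (acc : List (List Char)), l.length ≤ fuel →
      PySem.Chars.splitOn.go [' '] fuel l cur acc
        = acc.reverse ++ pvMapHead (cur.reverse ++ ·) (pvSplit1 l) := by
  induction fuel with
  | zero =>
    intro l cur acc h
    have hl : l = [] := List.eq_nil_of_length_eq_zero (Nat.le_zero.mp h)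
    subst hl
    simp [PySem.Chars.splitOn.go, pvSplit1, pvMapHead]
  | succ fuel ih =>
    intro l cur acc h
    cases l with
    | nil => simp [PySem.Chars.splitOn.go, pvSplit1, pvMapHead]
    | cons c rest =>
      by_cases hc : c = ' '
      · subst hc
        have hpre : List.isPrefixOf [' '] (' ' :: rest) = true := by
          simp [List.isPrefixOf]
        rw [show PySem.Chars.splitOn.go [' '] (fuel+1) (' ' :: rest) cur acc
              = PySem.Chars.splitOn.go [' '] fuel (List.drop 1 (' ' :: rest)) [] (cur.reverse :: acc) by
            simp [PySem.Chars.splitOn.go, hpre]]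
        rw [ih _ _ _ (by simpa using Nat.le_of_succ_le_succ h)]
        have : pvMapHead (([] : List Char).reverse ++ ·) (pvSplit1 rest) = pvSplit1 rest := by
          cases hr : pvSplit1 rest <;> simp [pvMapHead]
        simp only [List.drop_succ_cons, List.drop_zero]
        rw [this]
        have h2 : pvSplit1 (' ' :: rest) = [] :: pvSplit1 rest := by simp [pvSplit1]
        rw [h2]
        simp [pvMapHead]
      · have hpre : List.isPrefixOf [' '] (c :: rest) = false := by
          simp [List.isPrefixOf]
          exact fun hh => absurd hh.symm hc
        rw [show PySem.Chars.splitOn.go [' '] (fuel+1) (c :: rest) cur acc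
              = PySem.Chars.splitOn.go [' '] fuel rest (c :: cur) acc by
            simp [PySem.Chars.splitOn.go, hpre]]
        rw [ih _ _ _ (by simpa using Nat.le_of_succ_le_succ h)]
        rw [pvSplit1_cons_ne_space c rest hc]
        cases hr : pvSplit1 rest with
        | nil => exact absurd hr (pvSplit1_ne_nil rest)
        | cons p ps => simp [pvMapHead]

theorem pvSplitOn_space (l : List Char) :
    PySem.Chars.splitOn l [' '] = pvSplit1 l := by
  unfold PySem.Chars.splitOn
  rw [pvGo_eq (l.length + 1) l [] [] (by omega)]
  cases hr : pvSplit1 l with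
  | nil => exact absurd hr (pvSplit1_ne_nil l)
  | cons p ps => simp [pvMapHead]

theorem pvSplit1_no_space (t : List Char) (h : ' ' ∉ t) : pvSplit1 t = [t] := by
  induction t with
  | nil => rfl
  | cons c r ih =>
    have hc : c ≠ ' ' := fun hh => h (by simp [hh])
    rw [pvSplit1_cons_ne_space c r hc, ih (fun hm => h (by simp [hm]))]
    simp [pvMapHead]

theorem pvSplit1_append (b t : List Char) (h : ' ' ∉ t) :
    pvSplit1 (b ++ ' ' :: t) = pvSplit1 b ++ [t] := by
  induction b with
  | nil => simp [pvSplit1, pvSplit1_no_space t h]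
  | cons c b' ih =>
    by_cases hc : c = ' '
    · subst hc
      simp only [List.cons_append, pvSplit1, ih]
      rfl
    · rw [List.cons_append, pvSplit1_cons_ne_space c (b' ++ ' ' :: t) hc, ih,
        pvSplit1_cons_ne_space c b' hc]
      cases hb : pvSplit1 b' with
      | nil => exact absurd hb (pvSplit1_ne_nil b')
      | cons p ps => simp [pvMapHead]

theorem pvFlatten_split1 (b : List Char) :
    ((pvSplit1 b).map (· ++ [' '])).flatten = b ++ [' '] := by
  induction b with
  | nil => simp [pvSplit1]
  | cons c b' ih =>
    by_cases hc : c = ' '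
    · subst hc
      simp [pvSplit1, ih]
    · rw [pvSplit1_cons_ne_space c b' hc]
      cases hb : pvSplit1 b' with
      | nil => exact absurd hb (pvSplit1_ne_nil b')
      | cons p ps =>
        rw [hb] at ih
        simp only [pvMapHead, List.map_cons, List.flatten_cons] at *
        simp [← ih]

theorem pvFoldl_append_space (ps : List (List Char)) :
    ∀ (a : List Char), ps.foldl (fun a p => a ++ p ++ [' ']) a
      = a ++ (ps.map (· ++ [' '])).flatten := by
  induction ps with
  | nil => simp
  | cons p ps ih => intro a; simp [List.foldl_cons, List.append_assoc]

theorem pvMain (s : String) : sortable_name s = sortable_name_alt s := by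
  unfold sortable_name sortable_name_alt
  cases hd : s.toList.reverse.dropWhile pvNotSpace with
  | nil =>
    -- no space in s at all
    have hns : ' ' ∉ s.toList := by
      intro hm
      have heq : s.toList.reverse.takeWhile pvNotSpace = s.toList.reverse := by
        have := List.takeWhile_append_dropWhile (p := pvNotSpace) (l := s.toList.reverse)
        rw [hd, List.append_nil] at this; exact this
      have hm' : ' ' ∈ s.toList.reverse.takeWhile pvNotSpace := by
        rw [heq]; exact List.mem_reverse.mpr hm
      have := List.mem_takeWhile_imp hm'
      simp [pvNotSpace] at this
    have hsplit : PySem.Chars.splitOn s.toList [' '] = [s.toList] := by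
      rw [pvSplitOn_space, pvSplit1_no_space _ hns]
    simp [hsplit]
  | cons c headRev =>
    have hc : c = ' ' := by
      have := List.head_dropWhile_not (p := pvNotSpace) (l := s.toList.reverse) (by simp [hd])
      simp only [hd, List.head_cons] at this
      simpa [pvNotSpace] using this
    subst hc
    have h1 : s.toList.reverse = s.toList.reverse.takeWhile pvNotSpace ++ ' ' :: headRev := by
      conv_lhs => rw [← List.takeWhile_append_dropWhile (p := pvNotSpace) (l := s.toList.reverse)]
      rw [hd]
    set tr := s.toList.reverse.takeWhile pvNotSpace with htr
    have hdecomp : s.toList = headRev.reverse ++ ' ' :: tr.reverse := by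
      calc s.toList = s.toList.reverse.reverse := (List.reverse_reverse _).symm
        _ = headRev.reverse ++ ' ' :: tr.reverse := by rw [h1]; simp
    have hnt : ' ' ∉ tr.reverse := by
      intro hm
      have := List.mem_takeWhile_imp (List.mem_reverse.mp hm)
      simp [pvNotSpace] at this
    have hsplit : PySem.Chars.splitOn s.toList [' ']
        = pvSplit1 headRev.reverse ++ [tr.reverse] := by
      rw [pvSplitOn_space, hdecomp, pvSplit1_append _ _ hnt]
    simp only [hsplit]
    set ps := pvSplit1 headRev.reverse with hps
    have hpsne : ps ≠ [] := pvSplit1_ne_nil _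
    have hpspos : 0 < ps.length := List.length_pos_iff.mpr hpsne
    have hlen : (ps ++ [tr.reverse]).length = ps.length + 1 := by simp
    have hlen1 : 1 < (ps ++ [tr.reverse]).length := by omega
    rw [if_pos hlen1]
    have hbound : (((ps ++ [tr.reverse]).length : Int) - 1) = ((ps.length : Nat) : Int) := by
      rw [hlen]; push_cast; ring
    have hlast : PySem.List.pyGetD (ps ++ [tr.reverse]) (((ps ++ [tr.reverse]).length : Int) - 1) [] = tr.reverse := by
      rw [hbound, PySem.List.pyGetD_natCast]
      simp
    have hcongr : List.foldl (fun a i => a ++ PySem.List.pyGetD (ps ++ [tr.reverse]) i [] ++ [' '])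
          (tr.reverse ++ [',', ' ']) (PySem.List.pyRange 0 ((ps.length : Nat) : Int) 1)
        = List.foldl (fun a i => a ++ PySem.List.pyGetD ps i [] ++ [' '])
          (tr.reverse ++ [',', ' ']) (PySem.List.pyRange 0 ((ps.length : Nat) : Int) 1) := by
      apply PySem.List.foldl_congr_mem
      intro acc i hi
      rw [PySem.List.mem_pyRange_one] at hi
      obtain ⟨h0, hiu⟩ := hi
      have hiu' : i < (ps.length : Int) := by exact_mod_cast hiu
      rw [PySem.List.pyGetD_eq_getElem _ _ h0 (by simp; omega),
          PySem.List.pyGetD_eq_getElem _ _ h0 (by exact_mod_cast hiu')]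
      rw [List.getElem_append_left (by omega)]
    have hrange : PySem.List.pyRange 0 ((ps.length : Nat) : Int) 1
        = PySem.List.pyRange 0 (PySem.List.len ps) 1 := by
      simp [PySem.List.len]
    have hfold := PySem.List.foldl_pyRange_pyGetD ps ([] : List Char)
        (fun a p => a ++ p ++ [' ']) (tr.reverse ++ [',', ' ']) (a := 0) (by norm_num)
    rw [hlast, hbound, hcongr, hrange]
    rw [hfold]
    rw [pvFoldl_append_space]
    simp only [Int.toNat_zero, List.drop_zero, hps, pvFlatten_split1]
    simp

-- ===== VERDICT (by name: the statement is the Claim_ definition above) =====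
theorem sortable_name_spec : Claim_equal_sortable_name := by
  intro s _
  unfold Spec_sortable_name
  exact pvMain s
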